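-- pv_equiv track=rewrite | github.com/Thesarvesh19/Daily-Code-Chronicles | 2026/03- March/21-Saturday/solution.py | reverseSubmatrix
-- ===== SOURCE A (Python) =====
-- def reverseSubmatrix(grid, x, y, k):
--     # Iterate over half the rows of the submatrix
--     for i in range(k // 2):
--         for j in range(y, y + k):
--             # Swap vertically
--             grid[x + i][j], grid[x + k - 1 - i][j] = (
--                 grid[x + k - 1 - i][j],
--                 grid[x + i][j],
--             )
--
--     return grid
-- ===== SOURCE B (Python) =====
-- def reverseSubmatrix(grid, x, y, k):
--     # Gather copies of the k row segments, then write them back in reversed order.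
--     rows = [grid[x + i][y:y + k] for i in range(k)]
--     for i in range(k):
--         grid[x + i][y:y + k] = rows[k - 1 - i]
--     return grid
-- ===== Notes on version B (the rewrite author's own statement) =====
-- stated objective: idiomatic
-- what changed: Replaces A's half-height nested per-element mirrored-swap loops by two whole-row-segment passes: gather copies of the k row slices, then write them back in reversed order via slice assignment.
-- outside the precondition, e.g. on reverseSubmatrix([[1, 2], [3, 4]], 0, -1, 2): A returns [[3, 4], [1, 2]], B returns [[1, 2], [3, 4]]
import Mathlib
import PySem

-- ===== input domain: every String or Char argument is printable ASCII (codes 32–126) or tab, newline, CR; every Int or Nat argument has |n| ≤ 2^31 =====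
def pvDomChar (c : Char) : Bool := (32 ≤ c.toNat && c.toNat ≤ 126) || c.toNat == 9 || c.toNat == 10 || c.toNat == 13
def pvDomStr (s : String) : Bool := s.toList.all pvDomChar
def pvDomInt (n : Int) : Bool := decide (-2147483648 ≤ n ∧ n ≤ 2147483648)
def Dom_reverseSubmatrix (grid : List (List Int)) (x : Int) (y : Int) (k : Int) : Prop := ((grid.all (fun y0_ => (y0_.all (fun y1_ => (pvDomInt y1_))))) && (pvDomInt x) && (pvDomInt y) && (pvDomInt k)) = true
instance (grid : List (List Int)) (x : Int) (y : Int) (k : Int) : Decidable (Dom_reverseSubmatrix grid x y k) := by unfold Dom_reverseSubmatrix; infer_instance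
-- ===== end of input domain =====

-- B replaces A's half-height per-element mirrored-swap loops by a gather pass copying the k row
-- segments and a write-back pass storing them in reversed order (objective: idiomatic; both mutate
-- grid in place in Python and return it; the theorems are about the returned value).

-- ===== PORT A =====
def reverseSubmatrix (grid : List (List Int)) (x : Int) (y : Int) (k : Int) : List (List Int) :=
  (PySem.List.pyRange 0 (PySem.Int.floordiv k 2) 1).foldl (fun g i =>
    (PySem.List.pyRange y (y + k) 1).foldl (fun g j =>
      -- RHS tuple is read first, then the two element assignments happen in order
      let a := PySem.List.pyGetD (PySem.List.pyGetD g (x + i) []) j 0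
      let b := PySem.List.pyGetD (PySem.List.pyGetD g (x + k - 1 - i) []) j 0
      let g1 := PySem.List.pySetD g (x + i) (PySem.List.pySetD (PySem.List.pyGetD g (x + i) []) j b)
      PySem.List.pySetD g1 (x + k - 1 - i) (PySem.List.pySetD (PySem.List.pyGetD g1 (x + k - 1 - i) []) j a)
    ) g) grid

-- ===== PORT B =====
-- Python slice assignment row[a:b] = seg (step 1): replace indices [a', max a' b') where a', b' are
-- the clamped slice bounds (exact CPython semantics for step-1 slice assignment).
def sliceAssign (row : List Int) (a b : Int) (seg : List Int) : List Int :=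
  let a' := PySem.List.clampIdx row.length a
  let b' := max a' (PySem.List.clampIdx row.length b)
  row.take a' ++ seg ++ row.drop b'

def reverseSubmatrix_alt (grid : List (List Int)) (x : Int) (y : Int) (k : Int) : List (List Int) :=
  let rows := (PySem.List.pyRange 0 k 1).map (fun i =>
    PySem.List.slice (PySem.List.pyGetD grid (x + i) []) (some y) (some (y + k)))
  (PySem.List.pyRange 0 k 1).foldl (fun g i =>
    PySem.List.pySetD g (x + i)
      (sliceAssign (PySem.List.pyGetD g (x + i) []) y (y + k)
        (PySem.List.pyGetD rows (k - 1 - i) []))) grid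

-- ===== PRECONDITION & SPEC =====
-- Pre_ restricts to the natural submatrix domain: k ≤ 0 (nothing to do), or nonnegative x, y with the
-- k×k window inside the grid.  It excludes out-of-range coordinates on which A raises IndexError, and
-- negative/wrapping coordinates on which A's returned value is a negative-index wraparound artefact of
-- its per-element indexing (B's slices clip there instead).
def Pre_reverseSubmatrix (grid : List (List Int)) (x : Int) (y : Int) (k : Int) : Prop :=
  k ≤ 0 ∨ (0 ≤ x ∧ 0 ≤ y ∧ x + k ≤ (grid.length : Int) ∧
    ∀ row ∈ (grid.drop x.toNat).take k.toNat, y + k ≤ (row.length : Int))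
instance (grid : List (List Int)) (x : Int) (y : Int) (k : Int) : Decidable (Pre_reverseSubmatrix grid x y k) := by unfold Pre_reverseSubmatrix; infer_instance

def pvWitness_reverseSubmatrix : List (List Int) × Int × Int × Int := ([[1, 2], [3, 4]], 0, 0, 2)

def Spec_reverseSubmatrix (grid : List (List Int)) (x : Int) (y : Int) (k : Int) (out : List (List Int)) : Prop := out = reverseSubmatrix_alt grid x y k
instance (grid : List (List Int)) (x : Int) (y : Int) (k : Int) (out : List (List Int)) : Decidable (Spec_reverseSubmatrix grid x y k out) := by unfold Spec_reverseSubmatrix; infer_instance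

-- ===== CLAIM (what is proved, stated in full; the proofs are below) =====
def Claim_equal_reverseSubmatrix : Prop := ∀ (grid : List (List Int)) (x : Int) (y : Int) (k : Int), Dom_reverseSubmatrix grid x y k → Pre_reverseSubmatrix grid x y k → Spec_reverseSubmatrix grid x y k (reverseSubmatrix grid x y k)

-- ===== LEMMAS AND PROOFS =====

-- the segment row[a : a+n] and the splice "row with its segment replaced by src's segment"
def pvSeg (B : List Int) (a n : Nat) : List Int := (B.drop a).take n
def pvSpl (A B : List Int) (a n : Nat) : List Int := A.take a ++ pvSeg B a n ++ A.drop (a + n)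

theorem pvSpl_zero (A B : List Int) (a : Nat) : pvSpl A B a 0 = A := by
  simp [pvSpl, pvSeg]

theorem pvSpl_self (A : List Int) (a n : Nat) (_h : a + n ≤ A.length) : pvSpl A A a n = A := by
  unfold pvSpl pvSeg
  rw [show A.drop (a + n) = (A.drop a).drop n by simp [List.drop_drop]]
  rw [List.append_assoc, List.take_append_drop n (A.drop a), List.take_append_drop a A]

theorem pv_getD_append {α : Type} (p t : List α) (i : Nat) (d : α) :
    (p ++ t).getD (p.length + i) d = t.getD i d := by
  simp [List.getD, List.getElem?_append_right]

theorem pv_set_append {α : Type} (p t : List α) (i : Nat) (v : α) :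
    (p ++ t).set (p.length + i) v = p ++ t.set i v := by
  simp

theorem pv_getD_set_ne {α : Type} (l : List α) (i j : Nat) (v : α) (d : α) (h : i ≠ j) :
    (l.set i v).getD j d = l.getD j d := by
  simp [List.getD, List.getElem?_set_ne h]

theorem pv_getD_set_self {α : Type} (l : List α) (i : Nat) (v : α) (d : α) (h : i < l.length) :
    (l.set i v).getD i d = v := by
  simp [List.getD, h]

theorem pv_set_map_range {α : Type} (n : Nat) (f : Nat → α) (i : Nat) (v : α) :
    ((List.range n).map f).set i v = (List.range n).map (fun t => if t = i then v else f t) := by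
  apply List.ext_getElem
  · simp
  · intro j h1 h2
    simp only [List.getElem_set, List.getElem_map, List.getElem_range]
    simp only [List.length_set, List.length_map, List.length_range] at h1
    by_cases hij : i = j
    · simp [hij]
    · simp [hij, (Ne.symm hij : j ≠ i)]

theorem pv_getD_mid {α : Type} (P M S : List α) (t : Nat) (d : α) (ht : t < M.length) :
    (P ++ M ++ S).getD (P.length + t) d = M.getD t d := by
  rw [List.append_assoc, pv_getD_append]
  simp [List.getD, List.getElem?_append_left ht]

theorem pv_set_mid {α : Type} (P M S : List α) (t : Nat) (v : α) (ht : t < M.length) :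
    (P ++ M ++ S).set (P.length + t) v = P ++ M.set t v ++ S := by
  rw [List.append_assoc, pv_set_append, List.set_append_left _ _ ht, ← List.append_assoc]

theorem pv_mid_eq (grid : List (List Int)) (xn kn : Nat) (h : xn + kn ≤ grid.length) :
    (grid.drop xn).take kn = (List.range kn).map (fun t => grid.getD (xn + t) []) := by
  apply List.ext_getElem
  · simp; omega
  · intro j h1 h2
    simp only [List.getElem_take, List.getElem_drop, List.getElem_map, List.getElem_range]
    simp only [List.length_take, List.length_drop] at h1
    rw [List.getD_eq_getElem _ _ (by omega)]

-- B's write-back loop: n writes of F(current row, i) into rows P.length, P.length+1, …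
theorem pv_fold_write (F : List Int → Nat → List Int) (c : Int)
    (P M S : List (List Int)) (hc : c = (P.length : Int)) :
    ∀ (n : Nat), n ≤ M.length →
    (List.range n).foldl (fun (g : List (List Int)) (i : Nat) =>
        PySem.List.pySetD g (c + (i : Int)) (F (PySem.List.pyGetD g (c + (i : Int)) []) i))
      (P ++ M ++ S)
    = P ++ (List.range n).map (fun i => F (M.getD i []) i) ++ M.drop n ++ S := by
  intro n
  induction n with
  | zero => simp
  | succ n ih =>
    intro hn
    rw [List.range_succ, List.foldl_append, ih (by omega)]
    simp only [List.foldl_cons, List.foldl_nil]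
    have hidx : c + (n : Int) = ((P.length + ((List.range n).map (fun i => F (M.getD i []) i)).length : Nat) : Int) := by
      simp [hc]
    have hdrop : M.drop n = M.getD n [] :: M.drop (n + 1) := by
      rw [List.getD_eq_getElem _ _ (by omega)]
      exact List.drop_eq_getElem_cons (by omega)
    rw [hidx, List.append_assoc]
    rw [PySem.List.pyGetD_natCast, PySem.List.pySetD_natCast]
    rw [show P.length + ((List.range n).map (fun i => F (M.getD i []) i)).length
          = (P ++ (List.range n).map (fun i => F (M.getD i []) i)).length + 0 by simp]
    rw [pv_getD_append, pv_set_append]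
    rw [hdrop]
    simp only [List.cons_append, List.getD_cons_zero, List.set_cons_zero]
    simp [List.append_assoc]

theorem pv_getD_append' {α : Type} (p t : List α) (i : Nat) (d : α) (h : p.length ≤ i) :
    (p ++ t).getD i d = t.getD (i - p.length) d := by
  simp [List.getD, List.getElem?_append_right h]

theorem pv_set_append' {α : Type} (p t : List α) (i : Nat) (v : α) (h : p.length ≤ i) :
    (p ++ t).set i v = p ++ t.set (i - p.length) v := by
  apply List.ext_getElem
  · simp
  · intro j h1 h2
    simp only [List.getElem_set, List.getElem_append]
    split_ifs <;> first | rfl | omega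

theorem pv_set3 {α : Type} (g : List α) (r1 r2 : Nat) (h : r1 ≠ r2) (X Y X' : α) :
    ((g.set r1 X).set r2 Y).set r1 X' = (g.set r1 X').set r2 Y := by
  apply List.ext_getElem
  · simp
  · intro j h1 h2
    simp only [List.getElem_set]
    split_ifs <;> first | rfl | omega

theorem pvSpl_getD (A B : List Int) (a n : Nat) (hA : a + n < A.length) (hB : a + n ≤ B.length) :
    (pvSpl A B a n).getD (a + n) 0 = A.getD (a + n) 0 := by
  unfold pvSpl
  rw [pv_getD_append' _ _ _ _ (by simp [pvSeg]; omega)]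
  rw [show a + n - (A.take a ++ pvSeg B a n).length = 0 by simp [pvSeg]; omega]
  rw [List.drop_eq_getElem_cons hA, List.getD_cons_zero, List.getD_eq_getElem _ _ hA]

theorem pvSpl_set_step (A B : List Int) (a n : Nat) (hA : a + n < A.length) (hB : a + n < B.length) :
    (pvSpl A B a n).set (a + n) (B.getD (a + n) 0) = pvSpl A B a (n + 1) := by
  unfold pvSpl
  rw [pv_set_append' _ _ _ _ (by simp [pvSeg]; omega)]
  rw [show a + n - (A.take a ++ pvSeg B a n).length = 0 by simp [pvSeg]; omega]
  rw [List.drop_eq_getElem_cons hA, List.set_cons_zero]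
  rw [show pvSeg B a (n + 1) = pvSeg B a n ++ [B.getD (a + n) 0] by
        unfold pvSeg
        rw [List.take_add_one, List.getElem?_drop]
        rw [List.getElem?_eq_getElem (by omega), List.getD_eq_getElem _ _ hB]
        rfl]
  simp [show a + (n + 1) = a + n + 1 by omega]

-- A's inner loop over the n columns y, …, y+n-1 swaps the two row segments element by element
theorem pv_fold_swap (g : List (List Int)) (r1 r2 yn : Nat) (c1 c2 : Int)
    (hc1 : c1 = (r1 : Int)) (hc2 : c2 = (r2 : Int)) (hne : r1 ≠ r2)
    (h1 : r1 < g.length) (h2 : r2 < g.length) :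
    ∀ (n : Nat), yn + n ≤ (g.getD r1 []).length → yn + n ≤ (g.getD r2 []).length →
    (List.range n).foldl (fun (gg : List (List Int)) (t : Nat) =>
      PySem.List.pySetD
        (PySem.List.pySetD gg c1
          (PySem.List.pySetD (PySem.List.pyGetD gg c1 []) ((yn : Int) + (t : Int))
            (PySem.List.pyGetD (PySem.List.pyGetD gg c2 []) ((yn : Int) + (t : Int)) 0)))
        c2
        (PySem.List.pySetD
          (PySem.List.pyGetD
            (PySem.List.pySetD gg c1
              (PySem.List.pySetD (PySem.List.pyGetD gg c1 []) ((yn : Int) + (t : Int))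
                (PySem.List.pyGetD (PySem.List.pyGetD gg c2 []) ((yn : Int) + (t : Int)) 0)))
            c2 [])
          ((yn : Int) + (t : Int))
          (PySem.List.pyGetD (PySem.List.pyGetD gg c1 []) ((yn : Int) + (t : Int)) 0))) g
    = (g.set r1 (pvSpl (g.getD r1 []) (g.getD r2 []) yn n)).set r2
        (pvSpl (g.getD r2 []) (g.getD r1 []) yn n) := by
  subst hc1; subst hc2
  intro n
  induction n with
  | zero =>
    intro _ _
    rw [pvSpl_zero, pvSpl_zero]
    rw [List.getD_eq_getElem _ _ h1, List.getD_eq_getElem _ _ h2]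
    rw [List.set_getElem_self, List.set_getElem_self]
    rfl
  | succ n ih =>
    intro h1l h2l
    rw [List.range_succ, List.foldl_append, ih (by omega) (by omega)]
    simp only [List.foldl_cons, List.foldl_nil]
    have hne' : r2 ≠ r1 := fun h => hne h.symm
    have hg1 : ((g.set r1 (pvSpl (g.getD r1 []) (g.getD r2 []) yn n)).set r2
          (pvSpl (g.getD r2 []) (g.getD r1 []) yn n)).getD r1 []
        = pvSpl (g.getD r1 []) (g.getD r2 []) yn n := by
      rw [pv_getD_set_ne _ _ _ _ _ hne', pv_getD_set_self _ _ _ _ (by simpa using h1)]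
    have hg2 : ((g.set r1 (pvSpl (g.getD r1 []) (g.getD r2 []) yn n)).set r2
          (pvSpl (g.getD r2 []) (g.getD r1 []) yn n)).getD r2 []
        = pvSpl (g.getD r2 []) (g.getD r1 []) yn n := by
      rw [pv_getD_set_self _ _ _ _ (by simpa using h2)]
    rw [show ((yn : Int) + ((n : Nat) : Int)) = ((yn + n : Nat) : Int) by push_cast; ring]
    simp only [PySem.List.pyGetD_natCast, PySem.List.pySetD_natCast]
    rw [hg1, hg2]
    rw [pvSpl_getD (g.getD r1 []) (g.getD r2 []) yn n (by omega) (by omega)]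
    rw [pvSpl_getD (g.getD r2 []) (g.getD r1 []) yn n (by omega) (by omega)]
    rw [pvSpl_set_step (g.getD r1 []) (g.getD r2 []) yn n (by omega) (by omega)]
    rw [pv_set3 _ _ _ hne]
    rw [pv_getD_set_self _ _ _ _ (by simpa using h2)]
    rw [pvSpl_set_step (g.getD r2 []) (g.getD r1 []) yn n (by omega) (by omega)]
    rw [List.set_set]

theorem pv_sliceAssign_eq (row seg : List Int) (yn kn : Nat) (h : yn + kn ≤ row.length) :
    sliceAssign row (yn : Int) ((yn : Int) + (kn : Int)) seg
    = row.take yn ++ seg ++ row.drop (yn + kn) := by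
  rw [show ((yn : Int) + (kn : Int)) = ((yn + kn : Nat) : Int) by push_cast; ring]
  simp only [sliceAssign, PySem.List.clampIdx_natCast]
  rw [Nat.min_eq_left (by omega), Nat.min_eq_left (by omega), Nat.max_eq_right (by omega)]

-- B over a decomposed grid
theorem pv_B_core (P M S : List (List Int)) (yn kn : Nat) (hM : M.length = kn)
    (hrow : ∀ i < kn, yn + kn ≤ (M.getD i []).length) :
    reverseSubmatrix_alt (P ++ M ++ S) (P.length : Int) (yn : Int) (kn : Int)
    = P ++ (List.range kn).map (fun i =>
        pvSpl (M.getD i []) (M.getD (kn - 1 - i) []) yn kn) ++ S := by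
  unfold reverseSubmatrix_alt
  simp only [PySem.List.pyRange_zero_nat, List.foldl_map, List.map_map]
  have hrows : (List.range kn).map
        ((fun i => PySem.List.slice (PySem.List.pyGetD (P ++ M ++ S) ((P.length : Int) + i) [])
            (some (yn : Int)) (some ((yn : Int) + (kn : Int)))) ∘ (fun k : Nat => (k : Int)))
      = (List.range kn).map (fun i => pvSeg (M.getD i []) yn kn) := by
    apply List.map_congr_left
    intro i hi
    simp only [List.mem_range] at hi
    simp only [Function.comp]
    rw [show ((P.length : Int) + (i : Int)) = ((P.length + i : Nat) : Int) by push_cast; ring]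
    rw [PySem.List.pyGetD_natCast, pv_getD_mid P M S i [] (by omega)]
    rw [show ((yn : Int) + (kn : Int)) = ((yn : Int) + ((kn : Nat) : Int)) by rfl]
    rw [PySem.List.slice_natCast_add]
    rfl
  rw [hrows]
  rw [pv_fold_write
        (fun row i => sliceAssign row (yn : Int) ((yn : Int) + (kn : Int))
          (PySem.List.pyGetD ((List.range kn).map (fun i => pvSeg (M.getD i []) yn kn))
            ((kn : Int) - 1 - (i : Int)) []))
        (P.length : Int) P M S rfl kn (by omega)]
  rw [List.drop_eq_nil_of_le (by omega)]
  simp only [List.append_nil]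
  congr 1
  congr 1
  apply List.map_congr_left
  intro i hi
  rw [show ((kn : Int) - 1 - (i : Int)) = ((kn - 1 - i : Nat) : Int) by
        simp only [List.mem_range] at hi; omega]
  simp only [List.mem_range] at hi
  rw [PySem.List.pyGetD_natCast, PySem.List.getD_map_range _ _ _ _ (by omega)]
  rw [pv_sliceAssign_eq _ _ _ _ (hrow i hi)]
  rfl

-- characterisation of B
theorem pv_B_char (grid : List (List Int)) (xn yn kn : Nat)
    (hlen : xn + kn ≤ grid.length)
    (hrow : ∀ i < kn, yn + kn ≤ (grid.getD (xn + i) []).length) :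
    reverseSubmatrix_alt grid (xn : Int) (yn : Int) (kn : Int)
    = grid.take xn
      ++ (List.range kn).map (fun i =>
            pvSpl (grid.getD (xn + i) []) (grid.getD (xn + (kn - 1 - i)) []) yn kn)
      ++ grid.drop (xn + kn) := by
  have hP : (grid.take xn).length = xn := by simp; omega
  have hM : ((grid.drop xn).take kn).length = kn := by simp; omega
  have hspl : grid = grid.take xn ++ (grid.drop xn).take kn ++ grid.drop (xn + kn) := by
    rw [List.append_assoc]
    rw [show (grid.drop xn).take kn ++ grid.drop (xn + kn) = grid.drop xn by
          rw [show grid.drop (xn + kn) = (grid.drop xn).drop kn by simp [List.drop_drop]]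
          exact List.take_append_drop _ _]
    rw [List.take_append_drop]
  have hrow' : ∀ i < kn, yn + kn ≤ (((grid.drop xn).take kn).getD i []).length := by
    intro i hi
    rw [pv_mid_eq grid xn kn hlen, PySem.List.getD_map_range _ _ _ _ hi]
    exact hrow i hi
  have key := pv_B_core (grid.take xn) ((grid.drop xn).take kn) (grid.drop (xn + kn)) yn kn hM hrow'
  rw [hP] at key
  rw [← hspl] at key
  rw [key]
  congr 1
  congr 1
  apply List.map_congr_left
  intro i hi
  simp only [List.mem_range] at hi
  rw [pv_mid_eq grid xn kn hlen, PySem.List.getD_map_range _ _ _ _ hi,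
      PySem.List.getD_map_range _ _ _ _ (by omega)]

theorem pv_self_map {α : Type} [Inhabited α] (M : List α) (kn : Nat) (hM : M.length = kn) :
    (List.range kn).map (fun t => M.getD t default) = M := by
  apply List.ext_getElem
  · simp [hM]
  · intro j h1 h2
    simp only [List.getElem_map, List.getElem_range]
    rw [List.getD_eq_getElem _ _ (by omega)]

-- A over a decomposed grid
theorem pv_A_core (P M S : List (List Int)) (yn kn : Nat) (hM : M.length = kn)
    (hrow : ∀ i < kn, yn + kn ≤ (M.getD i []).length) :
    reverseSubmatrix (P ++ M ++ S) (P.length : Int) (yn : Int) (kn : Int)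
    = P ++ (List.range kn).map (fun i =>
        pvSpl (M.getD i []) (M.getD (kn - 1 - i) []) yn kn) ++ S := by
  unfold reverseSubmatrix
  rw [show PySem.Int.floordiv (kn : Int) 2 = ((kn / 2 : Nat) : Int) from by
        exact_mod_cast PySem.Int.floordiv_natCast kn 2]
  rw [PySem.List.pyRange_zero_nat, List.foldl_map]
  rw [PySem.List.pyRange_one ((yn : Int)) ((yn : Int) + (kn : Int))]
  rw [show ((yn : Int) + (kn : Int) - (yn : Int)).toNat = kn by omega]
  simp only [List.foldl_map]
  have main : ∀ h, h ≤ kn / 2 →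
      (List.range h).foldl (fun (g : List (List Int)) (i : Nat) =>
        (List.range kn).foldl (fun (g : List (List Int)) (t : Nat) =>
          let j := ((yn : Int) + (t : Int))
          let a := PySem.List.pyGetD (PySem.List.pyGetD g ((P.length : Int) + (i : Int)) []) j 0
          let b := PySem.List.pyGetD (PySem.List.pyGetD g ((P.length : Int) + (kn : Int) - 1 - (i : Int)) []) j 0
          let g1 := PySem.List.pySetD g ((P.length : Int) + (i : Int))
            (PySem.List.pySetD (PySem.List.pyGetD g ((P.length : Int) + (i : Int)) []) j b)
          PySem.List.pySetD g1 ((P.length : Int) + (kn : Int) - 1 - (i : Int))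
            (PySem.List.pySetD (PySem.List.pyGetD g1 ((P.length : Int) + (kn : Int) - 1 - (i : Int)) []) j a)) g)
        (P ++ M ++ S)
      = P ++ (List.range kn).map (fun t =>
          if t < h ∨ kn - 1 - t < h then pvSpl (M.getD t []) (M.getD (kn - 1 - t) []) yn kn
          else M.getD t []) ++ S := by
    intro h
    induction h with
    | zero =>
      intro _
      simp only [List.range_zero, List.foldl_nil]
      congr 1
      congr 1
      rw [show (fun t => if t < 0 ∨ kn - 1 - t < 0 then pvSpl (M.getD t []) (M.getD (kn - 1 - t) []) yn kn
            else M.getD t []) = (fun t => M.getD t []) from by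
          funext t; simp]
      exact (pv_self_map M kn hM).symm
    | succ h ih =>
      intro hh
      rw [List.range_succ, List.foldl_append, ih (by omega)]
      simp only [List.foldl_cons, List.foldl_nil]
      set gmid := (List.range kn).map (fun t =>
          if t < h ∨ kn - 1 - t < h then pvSpl (M.getD t []) (M.getD (kn - 1 - t) []) yn kn
          else M.getD t []) with hgmid
      have hgl : gmid.length = kn := by rw [hgmid]; simp
      have hr1get : (P ++ gmid ++ S).getD (P.length + h) [] = M.getD h [] := by
        rw [pv_getD_mid _ _ _ _ _ (by omega)]
        rw [hgmid, PySem.List.getD_map_range _ _ _ _ (by omega)]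
        rw [if_neg (by omega)]
      have hr2get : (P ++ gmid ++ S).getD (P.length + (kn - 1 - h)) [] = M.getD (kn - 1 - h) [] := by
        rw [pv_getD_mid _ _ _ _ _ (by omega)]
        rw [hgmid, PySem.List.getD_map_range _ _ _ _ (by omega)]
        rw [if_neg (by omega)]
      rw [show ((P.length : Int) + (h : Int)) = ((P.length + h : Nat) : Int) by push_cast; ring]
      rw [show ((P.length : Int) + (kn : Int) - 1 - (h : Int)) = ((P.length + (kn - 1 - h) : Nat) : Int) by omega]
      rw [pv_fold_swap (P ++ gmid ++ S) (P.length + h) (P.length + (kn - 1 - h)) yn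
            ((P.length + h : Nat) : Int) ((P.length + (kn - 1 - h) : Nat) : Int) rfl rfl
            (by omega) (by simp [hgl]; omega) (by simp [hgl]; omega) kn
            (by rw [hr1get]; exact hrow h (by omega))
            (by rw [hr2get]; exact hrow (kn - 1 - h) (by omega))]
      rw [hr1get, hr2get]
      rw [pv_set_mid _ _ _ _ _ (by omega)]
      rw [pv_set_mid _ _ _ _ _ (by simp [hgl]; omega)]
      congr 1
      congr 1
      rw [hgmid, pv_set_map_range, pv_set_map_range]
      apply List.map_congr_left
      intro t ht'
      simp only [List.mem_range] at ht'
      by_cases h1t : t = kn - 1 - h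
      · rw [if_pos h1t, if_pos (by omega)]
        rw [h1t, show kn - 1 - (kn - 1 - h) = h by omega]
      · rw [if_neg h1t]
        by_cases h2t : t = h
        · rw [if_pos h2t, if_pos (by omega), h2t]
        · rw [if_neg h2t]
          by_cases hcnd : t < h ∨ kn - 1 - t < h
          · rw [if_pos hcnd, if_pos (by omega)]
          · rw [if_neg hcnd, if_neg (by omega)]
  have hfin := main (kn / 2) (le_refl _)
  rw [hfin]
  congr 1
  congr 1
  apply List.map_congr_left
  intro t ht
  simp only [List.mem_range] at ht
  by_cases hc : t < kn / 2 ∨ kn - 1 - t < kn / 2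
  · rw [if_pos hc]
  · rw [if_neg hc]
    have ht2 : kn - 1 - t = t := by omega
    rw [ht2, pvSpl_self _ _ _ (hrow t ht)]

-- characterisation of A
theorem pv_A_char (grid : List (List Int)) (xn yn kn : Nat)
    (hlen : xn + kn ≤ grid.length)
    (hrow : ∀ i < kn, yn + kn ≤ (grid.getD (xn + i) []).length) :
    reverseSubmatrix grid (xn : Int) (yn : Int) (kn : Int)
    = grid.take xn
      ++ (List.range kn).map (fun i =>
            pvSpl (grid.getD (xn + i) []) (grid.getD (xn + (kn - 1 - i)) []) yn kn)
      ++ grid.drop (xn + kn) := by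
  have hP : (grid.take xn).length = xn := by simp; omega
  have hM : ((grid.drop xn).take kn).length = kn := by simp; omega
  have hspl : grid = grid.take xn ++ (grid.drop xn).take kn ++ grid.drop (xn + kn) := by
    rw [List.append_assoc]
    rw [show (grid.drop xn).take kn ++ grid.drop (xn + kn) = grid.drop xn by
          rw [show grid.drop (xn + kn) = (grid.drop xn).drop kn by simp [List.drop_drop]]
          exact List.take_append_drop _ _]
    rw [List.take_append_drop]
  have hrow' : ∀ i < kn, yn + kn ≤ (((grid.drop xn).take kn).getD i []).length := by
    intro i hi
    rw [pv_mid_eq grid xn kn hlen, PySem.List.getD_map_range _ _ _ _ hi]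
    exact hrow i hi
  have key := pv_A_core (grid.take xn) ((grid.drop xn).take kn) (grid.drop (xn + kn)) yn kn hM hrow'
  rw [hP] at key
  rw [← hspl] at key
  rw [key]
  congr 1
  congr 1
  apply List.map_congr_left
  intro i hi
  simp only [List.mem_range] at hi
  rw [pv_mid_eq grid xn kn hlen, PySem.List.getD_map_range _ _ _ _ hi,
      PySem.List.getD_map_range _ _ _ _ (by omega)]

theorem pv_A_trivial (grid : List (List Int)) (x y k : Int) (hk : k ≤ 0) :
    reverseSubmatrix grid x y k = grid := by
  unfold reverseSubmatrix
  have hd : PySem.Int.floordiv k 2 ≤ 0 := by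
    have := PySem.Int.floordiv_lt_iff_lt_mul (a := k) (b := 2) (q := 1) (by omega)
    omega
  rw [PySem.List.pyRange_one_eq_nil (a := 0) (b := PySem.Int.floordiv k 2) hd]
  rfl

theorem pv_B_trivial (grid : List (List Int)) (x y k : Int) (hk : k ≤ 0) :
    reverseSubmatrix_alt grid x y k = grid := by
  unfold reverseSubmatrix_alt
  rw [PySem.List.pyRange_one_eq_nil (a := 0) (b := k) hk]
  rfl

-- ===== VERDICT (by name: the statement is the Claim_ definition above) =====
theorem reverseSubmatrix_spec : Claim_equal_reverseSubmatrix := by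
  intro grid x y k _ hpre
  unfold Spec_reverseSubmatrix
  by_cases hk : k ≤ 0
  · rw [pv_A_trivial grid x y k hk, pv_B_trivial grid x y k hk]
  · rcases hpre with hk' | ⟨hx0, hy0, hxk, hrows⟩
    · omega
    obtain ⟨xn, rfl⟩ : ∃ n : Nat, x = (n : Int) := ⟨x.toNat, (Int.toNat_of_nonneg hx0).symm⟩
    obtain ⟨yn, rfl⟩ : ∃ n : Nat, y = (n : Int) := ⟨y.toNat, (Int.toNat_of_nonneg hy0).symm⟩
    obtain ⟨kn, rfl⟩ : ∃ n : Nat, k = (n : Int) := ⟨k.toNat, (Int.toNat_of_nonneg (by omega)).symm⟩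
    have hlen : xn + kn ≤ grid.length := by exact_mod_cast hxk
    have hrow : ∀ i < kn, yn + kn ≤ (grid.getD (xn + i) []).length := by
      intro i hi
      have hmem : grid.getD (xn + i) [] ∈ (grid.drop xn).take kn := by
        rw [pv_mid_eq grid xn kn hlen]
        exact List.mem_map.mpr ⟨i, List.mem_range.mpr hi, rfl⟩
      have := hrows _ (by simpa using hmem)
      exact_mod_cast this
    rw [pv_A_char grid xn yn kn hlen hrow, pv_B_char grid xn yn kn hlen hrow]
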